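-- pv_equiv track=rewrite | github.com/Choeseonjeong/Baekjoon | 프로그래머스/0/181837. 커피 심부름/커피 심부름.py | solution
-- ===== SOURCE A (Python) =====
-- def solution(order):
--     charge = 0
--     a = ["iceamericano", "americanoice","hotamericano", "americanohot""americano","anything","americano"]
--     b = ["icecafelatte", "cafelatteice","hotcafelatte", "cafelattehot","cafelatte"]
--
--     for word in order:
--         if word in a:
--             charge+=4500
--         elif word in b:
--             charge += 5000
--         else:
--             charge+=4500
--     return charge
-- ===== SOURCE B (Python) =====
-- LATTE = {"icecafelatte", "cafelatteice", "hotcafelatte", "cafelattehot", "cafelatte"}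
--
-- def solution(order):
--     # Pass 1: build a frequency table of the orders.
--     counts = {}
--     for w in order:
--         counts[w] = counts.get(w, 0) + 1
--     # Pass 2: price each DISTINCT drink once, weighted by its multiplicity.
--     total = 0
--     for w, c in counts.items():
--         total += (5000 if w in LATTE else 4500) * c
--     return total
-- ===== Notes on version B (the rewrite author's own statement) =====
-- stated objective: alternative
-- what changed: Instead of A's per-item three-branch accumulator over the order list, B first aggregates the orders into a frequency dictionary and then prices each distinct drink name once, multiplying by its multiplicity; the dead americano list is dropped.
import Mathlib
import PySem

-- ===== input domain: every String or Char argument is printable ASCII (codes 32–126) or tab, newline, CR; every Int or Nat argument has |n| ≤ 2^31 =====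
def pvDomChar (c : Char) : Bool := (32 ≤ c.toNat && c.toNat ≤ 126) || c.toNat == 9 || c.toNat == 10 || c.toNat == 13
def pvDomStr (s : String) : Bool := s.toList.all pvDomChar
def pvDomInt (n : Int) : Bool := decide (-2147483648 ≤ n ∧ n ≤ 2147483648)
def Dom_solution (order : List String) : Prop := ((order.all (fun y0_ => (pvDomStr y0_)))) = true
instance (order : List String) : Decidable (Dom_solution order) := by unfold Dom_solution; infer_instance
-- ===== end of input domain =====

-- B aggregates the orders into a frequency dictionary and prices each distinct name once,
-- weighted by multiplicity (the dead americano list of A is dropped); objective: alternative.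

-- ===== PORT A =====
-- A's list `a` (note Python's adjacent-string-literal concatenation "americanohot""americano")
def pvA_a : List String :=
  ["iceamericano", "americanoice", "hotamericano", "americanohotamericano", "anything", "americano"]
def pvA_b : List String :=
  ["icecafelatte", "cafelatteice", "hotcafelatte", "cafelattehot", "cafelatte"]

def solution (order : List String) : Int :=
  order.foldl (fun charge word =>
    if word ∈ pvA_a then charge + 4500
    else if word ∈ pvA_b then charge + 5000
    else charge + 4500) 0

-- ===== PORT B =====
def pvB_latte : List String :=
  ["icecafelatte", "cafelatteice", "hotcafelatte", "cafelattehot", "cafelatte"]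

def solution_alt (order : List String) : Int :=
  -- pass 1: counts[w] = counts.get(w, 0) + 1
  let counts : PySem.Dict String Int :=
    order.foldl (fun d w => d.insert w (d.getD w 0 + 1)) PySem.Dict.empty
  -- pass 2: total += (5000 if w in LATTE else 4500) * c over counts.items()
  counts.items.foldl (fun total p =>
    total + (if p.1 ∈ pvB_latte then (5000 : Int) else 4500) * p.2) 0

-- ===== PRECONDITION & SPEC =====
def Spec_solution (order : List String) (out : Int) : Prop := out = solution_alt order
instance (order : List String) (out : Int) : Decidable (Spec_solution order out) := by unfold Spec_solution; infer_instance

-- ===== CLAIM (what is proved, stated in full; the proofs are below) =====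
def Claim_equal_solution : Prop := ∀ (order : List String), Dom_solution order → Spec_solution order (solution order)

-- ===== LEMMAS AND PROOFS =====

-- per-word price B charges
def pvPrice (w : String) : Int := if w ∈ pvB_latte then 5000 else 4500

-- A's branches charge exactly pvPrice per word (the two literal lists are disjoint)
theorem pvA_step (w : String) :
    (if w ∈ pvA_a then (4500 : Int) else if w ∈ pvA_b then 5000 else 4500) = pvPrice w := by
  by_cases ha : w ∈ pvA_a
  · have hb : w ∉ pvB_latte := by
      revert ha; simp [pvA_a, pvB_latte]; intro h
      rcases h with h|h|h|h|h|h <;> simp [h]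
    simp [pvPrice, ha, hb]
  · by_cases hb : w ∈ pvA_b
    · have : w ∈ pvB_latte := by simpa [pvB_latte, pvA_b] using hb
      simp [pvPrice, ha, hb, this]
    · have : w ∉ pvB_latte := by simpa [pvB_latte, pvA_b] using hb
      simp [pvPrice, ha, hb, this]

theorem pvA_fold (order : List String) (c : Int) :
    order.foldl (fun charge word =>
      if word ∈ pvA_a then charge + 4500
      else if word ∈ pvA_b then charge + 5000
      else charge + 4500) c
    = c + (order.map pvPrice).sum := by
  induction order generalizing c with
  | nil => simp
  | cons w ws ih =>
    simp only [List.foldl_cons, List.map_cons, List.sum_cons, ih]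
    have := pvA_step w
    by_cases ha : w ∈ pvA_a
    · simp only [if_pos ha] at this ⊢
      rw [this]; ring
    · by_cases hb : w ∈ pvA_b
      · simp only [if_neg ha, if_pos hb] at this ⊢
        rw [this]; ring
      · simp only [if_neg ha, if_neg hb] at this ⊢
        rw [this]; ring

theorem pvB_fold {α : Type} (l : List α) (f : α → Int) (c : Int) :
    l.foldl (fun total p => total + f p) c = c + (l.map f).sum := by
  induction l generalizing c with
  | nil => simp
  | cons x xs ih => simp only [List.foldl_cons, List.map_cons, List.sum_cons, ih]; ring

theorem pv_ofList_toFinset (order : List String) :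
    (PySem.Set.ofList order).toFinset = order.toFinset := by
  ext x; simp [List.mem_toFinset, PySem.Set.mem_ofList]

theorem pvB_eq_sum (order : List String) :
    solution_alt order = (order.map pvPrice).sum := by
  unfold solution_alt
  rw [PySem.Dict.foldl_insert_getD_add_one_eq_counter, pvB_fold,
    PySem.Dict.items_counter]
  simp only [List.map_map, Function.comp_def, zero_add]
  -- sum over the distinct names, weighted by count, equals sum over the list
  have hnd : (PySem.Set.ofList order).Nodup := PySem.Set.nodup_ofList order
  calc ((PySem.Set.ofList order).map (fun k =>
          (if k ∈ pvB_latte then (5000 : Int) else 4500) * (order.count k : Int))).sum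
      = ∑ m ∈ (PySem.Set.ofList order).toFinset,
          (if m ∈ pvB_latte then (5000 : Int) else 4500) * (order.count m : Int) := by
        rw [List.sum_toFinset _ hnd]
    _ = ∑ m ∈ order.toFinset, order.count m • pvPrice m := by
        rw [pv_ofList_toFinset]
        refine Finset.sum_congr rfl fun m _ => ?_
        simp [pvPrice, mul_comm]
    _ = (order.map pvPrice).sum := (Finset.sum_list_map_count order pvPrice).symm

-- ===== VERDICT (by name: the statement is the Claim_ definition above) =====
theorem solution_spec : Claim_equal_solution := by
  intro order _
  unfold Spec_solution solution
  rw [pvA_fold, pvB_eq_sum, zero_add]
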